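-- pv_equiv track=rewrite | github.com/murphys7017/AstrBot | astrbot/core/prompt/input_annotations.py | extract_input_annotation_fields
-- ===== SOURCE A (Python) =====
-- SUPPORTED_INPUT_ANNOTATION_FIELDS: tuple[str, ...] = (
--     "semantic_type",
--     "explanation",
--     "explanation_source",
--     "context_role",
-- )
--
-- def extract_input_annotation_fields(raw: object) -> dict[str, str]:
--     """Keep only supported string fields from a raw annotation payload."""
--     if not isinstance(raw, dict):
--         return {}
--
--     annotation: dict[str, str] = {}
--     for field in SUPPORTED_INPUT_ANNOTATION_FIELDS:
--         value = raw.get(field)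
--         if isinstance(value, str):
--             normalized = value.strip()
--             if normalized:
--                 annotation[field] = normalized
--     return annotation
-- ===== SOURCE B (Python) =====
-- SUPPORTED_INPUT_ANNOTATION_FIELDS: tuple[str, ...] = (
--     "semantic_type",
--     "explanation",
--     "explanation_source",
--     "context_role",
-- )
--
-- _SUPPORTED: set = set(SUPPORTED_INPUT_ANNOTATION_FIELDS)
--
-- def extract_input_annotation_fields(raw: object) -> dict[str, str]:
--     """Keep only supported string fields from a raw annotation payload."""
--     if not isinstance(raw, dict):
--         return {}
--     found = {
--         key: value.strip()
--         for key, value in raw.items()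
--         if key in _SUPPORTED and isinstance(value, str) and value.strip()
--     }
--     return {field: found[field] for field in SUPPORTED_INPUT_ANNOTATION_FIELDS if field in found}
-- ===== Notes on version B (the rewrite author's own statement) =====
-- stated objective: alternative
-- what changed: B scans the payload's items once, keeping entries whose key lies in a set of the supported names, then emits the kept fields in the canonical field order, instead of probing the four known keys with raw.get.
import Mathlib
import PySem

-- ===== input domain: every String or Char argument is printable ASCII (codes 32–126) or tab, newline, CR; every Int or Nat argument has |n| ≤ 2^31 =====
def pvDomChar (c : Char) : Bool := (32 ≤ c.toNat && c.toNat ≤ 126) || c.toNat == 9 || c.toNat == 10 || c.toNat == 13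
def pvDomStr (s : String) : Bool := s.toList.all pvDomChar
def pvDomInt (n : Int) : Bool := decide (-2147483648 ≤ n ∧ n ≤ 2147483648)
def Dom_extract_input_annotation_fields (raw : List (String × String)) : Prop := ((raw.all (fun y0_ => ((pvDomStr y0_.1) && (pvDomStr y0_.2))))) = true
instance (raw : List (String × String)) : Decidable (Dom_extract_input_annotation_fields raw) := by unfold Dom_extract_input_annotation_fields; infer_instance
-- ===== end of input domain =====

-- B re-implements the extraction by a single filtering pass over the payload's items
-- followed by emission in the canonical field order, instead of probing the four known
-- keys with raw.get; same values, no speed claim (objective: alternative).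
-- The input dict[str, str] is the association list `raw`; both ports read it through its
-- canonical dict `PySem.Dict.ofList raw` (Python dict semantics: later duplicates overwrite).
-- The Python-side isinstance checks are trivially true under the dict[str, str] typing
-- of this task and are therefore not reproduced in either port.

-- SUPPORTED_INPUT_ANNOTATION_FIELDS
def pvFields : List String :=
  ["semantic_type", "explanation", "explanation_source", "context_role"]

-- ===== PORT A =====
def extract_input_annotation_fields (raw : List (String × String)) : List (String × String) :=
  let d := PySem.Dict.ofList raw
  (pvFields.foldl (fun annotation field =>
      match d.get? field with
      | some value =>
          let normalized := PySem.Str.strip value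
          if normalized ≠ "" then annotation.insert field normalized else annotation
      | none => annotation)
    (PySem.Dict.empty : PySem.Dict String String)).items

-- ===== PORT B =====
-- comprehension filter of B's pass over raw.items(): keep a supported key whose stripped value is non-empty
def pvStepB (found : PySem.Dict String String) (kv : String × String) : PySem.Dict String String :=
  if pvFields.contains kv.1 ∧ PySem.Str.strip kv.2 ≠ "" then
    found.insert kv.1 (PySem.Str.strip kv.2)
  else found

def extract_input_annotation_fields_alt (raw : List (String × String)) : List (String × String) :=
  -- for key, value in raw.items(): …
  let found := ((PySem.Dict.ofList raw).items).foldl pvStepB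
    (PySem.Dict.empty : PySem.Dict String String)
  -- {field: found[field] for field in SUPPORTED_INPUT_ANNOTATION_FIELDS if field in found}
  (pvFields.foldl (fun out field =>
      match found.get? field with
      | some v => out.insert field v
      | none => out)
    (PySem.Dict.empty : PySem.Dict String String)).items

-- ===== PRECONDITION & SPEC =====
def Spec_extract_input_annotation_fields (raw : List (String × String)) (out : List (String × String)) : Prop := out = extract_input_annotation_fields_alt raw
instance (raw : List (String × String)) (out : List (String × String)) : Decidable (Spec_extract_input_annotation_fields raw out) := by unfold Spec_extract_input_annotation_fields; infer_instance

-- ===== CLAIM (what is proved, stated in full; the proofs are below) =====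
def Claim_equal_extract_input_annotation_fields : Prop := ∀ (raw : List (String × String)), Dom_extract_input_annotation_fields raw → Spec_extract_input_annotation_fields raw (extract_input_annotation_fields raw)

-- ===== LEMMAS AND PROOFS =====

-- B's step leaves every other key's binding untouched
lemma pvStepB_get?_ne (d : PySem.Dict String String) (k v f : String) (hk : k ≠ f) :
    (pvStepB d (k, v)).get? f = d.get? f := by
  unfold pvStepB
  dsimp only
  split_ifs with h1
  · rw [PySem.Dict.get?_insert_of_ne d _ (Ne.symm hk)]
  · rfl

-- B's step at a supported key
lemma pvStepB_of_supported (d : PySem.Dict String String) (f v : String)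
    (hf : pvFields.contains f = true) :
    pvStepB d (f, v) =
      if PySem.Str.strip v ≠ "" then d.insert f (PySem.Str.strip v) else d := by
  unfold pvStepB
  dsimp only
  by_cases hs : PySem.Str.strip v ≠ ""
  · rw [if_pos ⟨hf, hs⟩, if_pos hs]
  · rw [if_neg (fun h => hs h.2), if_neg hs]

-- B's filtering pass, characterised pointwise: over a list of pairs with distinct keys,
-- the fold records at a supported key f the normalisation of the (unique) value at f.
lemma foldB_get? (ps : List (String × String)) (d : PySem.Dict String String)
    (f : String) (hf : pvFields.contains f = true) (hnd : (ps.map Prod.fst).Nodup) :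
    (ps.foldl pvStepB d).get? f =
      match ps.find? (fun p => p.1 == f) with
      | some p => if PySem.Str.strip p.2 ≠ "" then some (PySem.Str.strip p.2) else d.get? f
      | none => d.get? f := by
  induction ps generalizing d with
  | nil => simp
  | cons kv rest ih =>
    obtain ⟨k, v⟩ := kv
    simp only [List.map_cons, List.nodup_cons] at hnd
    rw [List.foldl_cons, ih _ hnd.2]
    by_cases hk : k = f
    · subst hk
      have hrest : rest.find? (fun p => p.1 == k) = none := by
        rw [List.find?_eq_none]
        intro p hp
        simp only [beq_iff_eq]
        intro h
        exact hnd.1 (h ▸ List.mem_map_of_mem hp)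
      rw [hrest, pvStepB_of_supported d k v hf]
      simp only [List.find?_cons, beq_self_eq_true]
      split_ifs with hs
      · rw [PySem.Dict.get?_insert_self]
      · rfl
    · rw [pvStepB_get?_ne d k v f hk]
      have hne : ((k, v).1 == f) = false := by simp [hk]
      simp only [List.find?_cons, hne]

-- Pointwise: B's `found` holds exactly A's normalised non-empty value at each supported field.
lemma found_get? (raw : List (String × String)) (f : String) (hf : pvFields.contains f = true) :
    (((PySem.Dict.ofList raw).items).foldl pvStepB
        (PySem.Dict.empty : PySem.Dict String String)).get? f =
      ((PySem.Dict.ofList raw).get? f).bind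
        (fun v => if PySem.Str.strip v ≠ "" then some (PySem.Str.strip v) else none) := by
  have hnd : (((PySem.Dict.ofList raw).items).map Prod.fst).Nodup :=
    PySem.Dict.nodup_keys_ofList raw
  rw [foldB_get? _ _ _ hf hnd]
  show _ = (Option.map (fun x => x.2) (((PySem.Dict.ofList raw).items).find? (fun p => p.1 == f))).bind _
  cases hfind : ((PySem.Dict.ofList raw).items).find? (fun p => p.1 == f) with
  | none => simp [PySem.Dict.get?_empty]
  | some p =>
    simp only [Option.map_some, Option.bind_some]
    split_ifs with hs
    · rfl
    · simp [PySem.Dict.get?_empty]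

-- ===== VERDICT (by name: the statement is the Claim_ definition above) =====
theorem extract_input_annotation_fields_spec : Claim_equal_extract_input_annotation_fields := by
  intro raw _
  unfold Spec_extract_input_annotation_fields
  unfold extract_input_annotation_fields extract_input_annotation_fields_alt
  dsimp only
  congr 1
  apply PySem.List.foldl_congr_mem
  intro ann f hfmem
  have hf : pvFields.contains f = true := List.elem_eq_true_of_mem hfmem
  rw [found_get? raw f hf]
  cases hget : (PySem.Dict.ofList raw).get? f with
  | none => rfl
  | some v =>
    simp only [Option.bind_some]
    by_cases hs : PySem.Str.strip v ≠ ""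
    · simp only [if_pos hs]
    · simp only [if_neg hs]
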